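-- pv_equiv track=rewrite | github.com/Koraavo/Jetedu-final-files | Calculator/part2-cleaner.py | operators
-- ===== SOURCE A (Python) =====
-- def operators(user_input):
--     numbers = []
--     operator_list = []
--     for i, values in enumerate(user_input):
--         if i % 2 == 1 and len(user_input) > 1:
--             operator_list.append(values)
--         elif i % 2 == 0 and values.lstrip('+-'):
--             numbers.append(values)
--     return numbers, operator_list
-- ===== SOURCE B (Python) =====
-- def operators(user_input):
--     # One pass over index pairs: consume a (number, operator) pair per step
--     # instead of testing index parity per element.
--     numbers = []
--     operator_list = []
--     pos = 0
--     while pos < len(user_input):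
--         v = user_input[pos]
--         if v.lstrip('+-'):
--             numbers.append(v)
--         if pos + 1 < len(user_input):
--             operator_list.append(user_input[pos + 1])
--         pos += 2
--     return numbers, operator_list
-- ===== Notes on version B (the rewrite author's own statement) =====
-- stated objective: alternative
-- what changed: Replaced the enumerate loop with per-index parity tests and a redundant len>1 guard by a single while loop that steps through the list two positions at a time, consuming one (number, operator) pair per iteration.
import Mathlib
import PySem

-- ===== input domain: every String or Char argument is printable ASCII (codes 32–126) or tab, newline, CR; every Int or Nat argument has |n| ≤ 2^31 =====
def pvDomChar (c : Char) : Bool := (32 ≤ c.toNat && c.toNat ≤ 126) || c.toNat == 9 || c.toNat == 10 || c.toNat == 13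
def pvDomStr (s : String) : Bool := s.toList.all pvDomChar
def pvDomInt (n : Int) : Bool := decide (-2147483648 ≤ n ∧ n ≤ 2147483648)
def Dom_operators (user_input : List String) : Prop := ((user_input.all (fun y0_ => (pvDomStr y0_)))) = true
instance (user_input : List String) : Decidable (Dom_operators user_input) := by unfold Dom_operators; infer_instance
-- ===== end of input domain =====

-- B rewrites A's enumerate-with-parity-test loop as a while loop consuming one (number, operator) pair per step; equal return value, no speed claim.

-- shared helper: exact port of s.lstrip('+-') (drop leading '+'/'-' characters)
def pmStrip (s : String) : List Char := s.toList.dropWhile (fun c => c == '+' || c == '-')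

-- ===== PORT A =====
-- enumerate indices are nonnegative, so Lean's `% 2` agrees with Python's here
def operators (user_input : List String) : List String × List String :=
  (PySem.List.enumerate user_input 0).foldl
    (fun acc p =>
      if p.1 % 2 == 1 && decide (user_input.length > 1) then
        (acc.1, acc.2 ++ [p.2])
      else if p.1 % 2 == 0 && !(pmStrip p.2).isEmpty then
        (acc.1 ++ [p.2], acc.2)
      else acc)
    ([], [])

-- ===== PORT B =====
-- the while loop of Source B: pos steps by 2; indices are in range where read
def operatorsAltGo (ui : List String) (pos : Nat) (numbers operator_list : List String) :
    List String × List String :=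
  if h : pos < ui.length then
    let v := ui[pos]
    let numbers' := if !(pmStrip v).isEmpty then numbers ++ [v] else numbers
    let operator_list' :=
      if h2 : pos + 1 < ui.length then operator_list ++ [ui[pos + 1]] else operator_list
    operatorsAltGo ui (pos + 2) numbers' operator_list'
  else (numbers, operator_list)
termination_by ui.length - pos

def operators_alt (user_input : List String) : List String × List String :=
  operatorsAltGo user_input 0 [] []

-- ===== PRECONDITION & SPEC =====
def Spec_operators (user_input : List String) (out : List String × List String) : Prop := out = operators_alt user_input
instance (user_input : List String) (out : List String × List String) : Decidable (Spec_operators user_input out) := by unfold Spec_operators; infer_instance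

-- ===== CLAIM (what is proved, stated in full; the proofs are below) =====
def Claim_equal_operators : Prop := ∀ (user_input : List String), Dom_operators user_input → Spec_operators user_input (operators user_input)

-- ===== LEMMAS AND PROOFS =====

-- proof-only reference function: the pair decomposition, two elements at a time
def spec2 : List String → List String × List String
  | [] => ([], [])
  | [a] => (if !(pmStrip a).isEmpty then [a] else [], [])
  | a :: b :: rest =>
    let r := spec2 rest
    ((if !(pmStrip a).isEmpty then a :: r.1 else r.1), b :: r.2)

-- A's loop body once the (constant) len > 1 guard is true
def stepT (acc : List String × List String) (p : Int × String) : List String × List String :=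
  if p.1 % 2 == 1 then (acc.1, acc.2 ++ [p.2])
  else if p.1 % 2 == 0 && !(pmStrip p.2).isEmpty then (acc.1 ++ [p.2], acc.2)
  else acc

lemma specB (ui : List String) (pos : Nat) (n o : List String) :
    operatorsAltGo ui pos n o =
      (n ++ (spec2 (ui.drop pos)).1, o ++ (spec2 (ui.drop pos)).2) := by
  induction pos, n, o using operatorsAltGo.induct ui with
  | case2 pos n o h =>
    rw [operatorsAltGo, dif_neg h, List.drop_eq_nil_of_le (by omega)]
    simp [spec2]
  | case1 pos n o h v nums ops ih =>
    rw [operatorsAltGo, dif_pos h]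
    simp only [v, nums, ops, dite_eq_ite] at ih ⊢
    rw [ih]
    by_cases h2 : pos + 1 < ui.length
    · have hd : ui.drop pos = ui[pos] :: ui[pos+1] :: ui.drop (pos+2) := by
        rw [List.drop_eq_getElem_cons h, List.drop_eq_getElem_cons h2]
      rw [hd]
      simp only [spec2]
      split <;> simp
    · have hd : ui.drop pos = [ui[pos]] := by
        have h1 : ui.drop (pos + 1) = [] := List.drop_eq_nil_of_le (by omega)
        rw [List.drop_eq_getElem_cons h, h1]
      rw [hd, List.drop_eq_nil_of_le (by omega : ui.length ≤ pos + 2)]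
      simp only [spec2]
      split <;> simp

lemma specA_true (ui : List String) : ∀ (k : Nat) (n o : List String),
    (PySem.List.enumerate ui (2 * (k : Int))).foldl stepT (n, o) =
      (n ++ (spec2 ui).1, o ++ (spec2 ui).2) := by
  induction ui using spec2.induct with
  | case1 =>
    intro k n o
    simp [PySem.List.enumerate, spec2]
  | case2 a =>
    intro k n o
    have e0 : ((2 * (k : Int)) % 2 == 1) = false := by
      have : (2 * (k : Int)) % 2 = 0 := Int.mul_emod_right 2 k
      rw [this]; rfl
    have e0' : ((2 * (k : Int)) % 2 == 0) = true := by
      have : (2 * (k : Int)) % 2 = 0 := Int.mul_emod_right 2 k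
      rw [this]; rfl
    rw [PySem.List.enumerate_cons, PySem.List.enumerate_nil]
    simp only [List.foldl_cons, List.foldl_nil, stepT, e0, e0', Bool.true_and,
      Bool.false_eq_true, if_false, spec2]
    split <;> simp
  | case3 a b rest ih =>
    intro k n o
    have e0 : ((2 * (k : Int)) % 2 == 1) = false := by
      have : (2 * (k : Int)) % 2 = 0 := Int.mul_emod_right 2 k
      rw [this]; rfl
    have e0' : ((2 * (k : Int)) % 2 == 0) = true := by
      have : (2 * (k : Int)) % 2 = 0 := Int.mul_emod_right 2 k
      rw [this]; rfl
    have e1 : ((2 * (k : Int) + 1) % 2 == 1) = true := by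
      have : (2 * (k : Int) + 1) % 2 = 1 := by omega
      rw [this]; rfl
    rw [PySem.List.enumerate_cons, PySem.List.enumerate_cons]
    have ecast : (2 * (k : Int) + 1 + 1) = 2 * ((k + 1 : Nat) : Int) := by push_cast; ring
    rw [ecast]
    simp only [List.foldl_cons, stepT, e0, e0', e1, Bool.true_and, Bool.false_eq_true,
      if_false, if_true]
    by_cases hc : (!(pmStrip a).isEmpty) = true
    · simp only [hc, if_true, ih (k + 1)]
      simp [spec2, hc]
    · simp only [hc, ih (k + 1)]
      simp only [Bool.not_eq_true] at hc
      simp [spec2, hc]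

-- ===== VERDICT (by name: the statement is the Claim_ definition above) =====
theorem operators_spec : Claim_equal_operators := by
  intro ui _
  unfold Spec_operators operators operators_alt
  rw [specB ui 0 [] []]
  simp only [List.drop_zero, List.nil_append]
  match ui with
  | [] => simp [PySem.List.enumerate, spec2]
  | [a] =>
    rw [PySem.List.enumerate_cons, PySem.List.enumerate_nil]
    simp only [List.foldl_cons, List.foldl_nil, spec2]
    norm_num
    split <;> simp
  | a :: b :: rest =>
    have hg : decide ((a :: b :: rest).length > 1) = true := by simp
    have hfun : ∀ (acc : List String × List String) (p : Int × String),
        p ∈ PySem.List.enumerate (a :: b :: rest) 0 →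
        (if p.1 % 2 == 1 && decide ((a :: b :: rest).length > 1) then (acc.1, acc.2 ++ [p.2])
         else if p.1 % 2 == 0 && !(pmStrip p.2).isEmpty then (acc.1 ++ [p.2], acc.2)
         else acc) = stepT acc p := by
      intro acc p _
      rw [hg, Bool.and_true]
      rfl
    rw [PySem.List.foldl_congr_mem _ _ stepT _ hfun]
    have h := specA_true (a :: b :: rest) 0 [] []
    simp only [Nat.cast_zero, mul_zero, List.nil_append] at h
    rw [h]
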